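-- pv_equiv track=rewrite | github.com/nischalshrestha/automatic_wat_discovery | Notebooks/py/dwarkanath/titanic-neural-networks/titanic-neural-networks.py | getCleanTitles
-- ===== SOURCE A (Python) =====
-- def getCleanTitles(title):
--     for i in range(len(title)):
--         if title[i] in ['Don', 'Sir', 'Jonkheer']:
--             title[i] = 'Noble'
--         elif title[i] in ['Rothes, the Countess. of (Lucy Noel Martha Dyer-Edwards)', 'Lady', 'Dona']:
--             title[i] = 'Noble'
--         elif title[i] in ['Mlle', 'Ms']:
--             title[i] = 'Miss'
--         elif title[i] == 'Mme':
--             title[i] = 'Mrs'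
--         elif title[i] in ['Capt', 'Col', 'Dr', 'Major', 'Rev']:
--             title[i] = 'Other'
--     return title
-- ===== SOURCE B (Python) =====
-- # Category-major rewrite: instead of one index loop with a five-branch cascade
-- # per element, run one whole-list substitution pass per (special title, label)
-- # pair, written back in place.  Correct because no replacement label ('Noble',
-- # 'Miss', 'Mrs', 'Other') is itself a special title, so the passes commute with
-- # A's per-element cascade.
-- _REPLACEMENTS = [
--     ('Don', 'Noble'), ('Sir', 'Noble'), ('Jonkheer', 'Noble'),
--     ('Rothes, the Countess. of (Lucy Noel Martha Dyer-Edwards)', 'Noble'),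
--     ('Lady', 'Noble'), ('Dona', 'Noble'),
--     ('Mlle', 'Miss'), ('Ms', 'Miss'),
--     ('Mme', 'Mrs'),
--     ('Capt', 'Other'), ('Col', 'Other'), ('Dr', 'Other'), ('Major', 'Other'), ('Rev', 'Other'),
-- ]
--
--
-- def getCleanTitles(title):
--     for old, new in _REPLACEMENTS:
--         title[:] = [new if t == old else t for t in title]
--     return title
-- ===== Notes on version B (the rewrite author's own statement) =====
-- stated objective: alternative
-- what changed: Swaps the loop nesting: instead of A's single index loop applying a five-branch if/elif cascade to each element, B runs one whole-list substitution pass per (special title, label) pair (14 staged passes written back in place), valid because no label is itself a special title.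
import Mathlib
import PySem

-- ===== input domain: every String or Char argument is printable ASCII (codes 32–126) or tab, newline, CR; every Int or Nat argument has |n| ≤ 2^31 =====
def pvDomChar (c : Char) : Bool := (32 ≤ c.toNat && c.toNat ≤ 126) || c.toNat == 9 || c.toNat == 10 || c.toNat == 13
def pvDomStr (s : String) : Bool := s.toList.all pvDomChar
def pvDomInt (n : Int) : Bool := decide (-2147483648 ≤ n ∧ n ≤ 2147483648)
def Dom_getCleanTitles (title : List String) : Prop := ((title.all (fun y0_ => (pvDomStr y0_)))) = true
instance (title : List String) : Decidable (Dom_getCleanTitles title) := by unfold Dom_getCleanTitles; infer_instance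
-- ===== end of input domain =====

-- B swaps the loop nesting: one whole-list substitution pass per (special title, label) pair
-- instead of A's single index loop with a five-branch cascade (return value proved equal;
-- both Pythons mutate the argument list in place).

-- ===== PORT A =====
-- for i in range(len(title)): five-branch if/elif cascade mutating title[i]
def getCleanTitles (title : List String) : List String :=
  (PySem.List.pyRange 0 (PySem.List.len title) 1).foldl (fun acc i =>
    if PySem.List.pyGetD acc i "" ∈ ["Don", "Sir", "Jonkheer"] then
      PySem.List.pySetD acc i "Noble"
    else if PySem.List.pyGetD acc i "" ∈
        ["Rothes, the Countess. of (Lucy Noel Martha Dyer-Edwards)", "Lady", "Dona"] then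
      PySem.List.pySetD acc i "Noble"
    else if PySem.List.pyGetD acc i "" ∈ ["Mlle", "Ms"] then
      PySem.List.pySetD acc i "Miss"
    else if PySem.List.pyGetD acc i "" = "Mme" then
      PySem.List.pySetD acc i "Mrs"
    else if PySem.List.pyGetD acc i "" ∈ ["Capt", "Col", "Dr", "Major", "Rev"] then
      PySem.List.pySetD acc i "Other"
    else acc) title

-- ===== PORT B =====
def replacements : List (String × String) :=
  [("Don", "Noble"), ("Sir", "Noble"), ("Jonkheer", "Noble"),
   ("Rothes, the Countess. of (Lucy Noel Martha Dyer-Edwards)", "Noble"),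
   ("Lady", "Noble"), ("Dona", "Noble"),
   ("Mlle", "Miss"), ("Ms", "Miss"),
   ("Mme", "Mrs"),
   ("Capt", "Other"), ("Col", "Other"), ("Dr", "Other"), ("Major", "Other"), ("Rev", "Other")]

-- for old, new in _REPLACEMENTS: title[:] = [new if t == old else t for t in title]
def getCleanTitles_alt (title : List String) : List String :=
  replacements.foldl (fun acc p => acc.map (fun t => if t = p.1 then p.2 else t)) title

-- ===== PRECONDITION & SPEC =====
def Spec_getCleanTitles (title : List String) (out : List String) : Prop := out = getCleanTitles_alt title
instance (title : List String) (out : List String) : Decidable (Spec_getCleanTitles title out) := by unfold Spec_getCleanTitles; infer_instance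

-- ===== CLAIM (what is proved, stated in full; the proofs are below) =====
def Claim_equal_getCleanTitles : Prop := ∀ (title : List String), Dom_getCleanTitles title → Spec_getCleanTitles title (getCleanTitles title)

-- ===== LEMMAS AND PROOFS =====

-- A's per-element branch cascade, as a pure function of the current entry.
def cascade (t : String) : String :=
  if t ∈ ["Don", "Sir", "Jonkheer"] then "Noble"
  else if t ∈ ["Rothes, the Countess. of (Lucy Noel Martha Dyer-Edwards)", "Lady", "Dona"] then "Noble"
  else if t ∈ ["Mlle", "Ms"] then "Miss"
  else if t = "Mme" then "Mrs"
  else if t ∈ ["Capt", "Col", "Dr", "Major", "Rev"] then "Other"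
  else t

-- A's loop body on a Nat index (what the port's body simplifies to on `range`)
def stepA (acc : List String) (i : Nat) : List String :=
  if acc.getD i "" ∈ ["Don", "Sir", "Jonkheer"] then acc.set i "Noble"
  else if acc.getD i "" ∈
      ["Rothes, the Countess. of (Lucy Noel Martha Dyer-Edwards)", "Lady", "Dona"] then acc.set i "Noble"
  else if acc.getD i "" ∈ ["Mlle", "Ms"] then acc.set i "Miss"
  else if acc.getD i "" = "Mme" then acc.set i "Mrs"
  else if acc.getD i "" ∈ ["Capt", "Col", "Dr", "Major", "Rev"] then acc.set i "Other"
  else acc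

-- A's step is a `set` with the cascade (the unmatched branch rewrites the entry unchanged)
lemma stepA_eq (acc : List String) (i : Nat) (h : i < acc.length) :
    stepA acc i = acc.set i (cascade (acc.getD i "")) := by
  unfold stepA cascade
  split_ifs <;> first
    | rfl
    | (rw [List.getD_eq_getElem _ _ h]; exact (List.set_getElem_self h).symm)

-- A's index loop over all indices is `map cascade`
lemma loopA_eq : ∀ (xs pre : List String),
    (List.range' pre.length xs.length).foldl stepA (pre ++ xs) = pre ++ xs.map cascade := by
  intro xs
  induction xs with
  | nil => intro pre; simp
  | cons x tl ih =>
    intro pre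
    rw [List.length_cons, List.range'_succ, List.foldl_cons]
    have hget : (pre ++ x :: tl).getD pre.length "" = x := by simp [List.getD]
    have hfirst : stepA (pre ++ x :: tl) pre.length = pre ++ cascade x :: tl := by
      rw [stepA_eq _ _ (by simp), hget]; simp
    rw [hfirst]
    simpa using ih (pre ++ [cascade x])

-- a fold of whole-list map passes is one map of the pointwise fold
lemma foldl_map_passes (ps : List (String × String)) :
    ∀ (xs : List String),
      ps.foldl (fun acc p => acc.map (fun t => if t = p.1 then p.2 else t)) xs
        = xs.map (fun t => ps.foldl (fun t p => if t = p.1 then p.2 else t) t) := by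
  induction ps with
  | nil => intro xs; simp
  | cons p tl ih =>
    intro xs
    simp only [List.foldl_cons, ih, List.map_map]
    rfl

-- the pointwise fold over the replacement pairs is A's cascade
lemma cascade_eq_passes (t : String) :
    cascade t = replacements.foldl (fun t p => if t = p.1 then p.2 else t) t := by
  unfold cascade
  split_ifs with h1 h2 h3 h4 h5
  · fin_cases h1 <;> decide
  · fin_cases h2 <;> decide
  · fin_cases h3 <;> decide
  · subst h4; decide
  · fin_cases h5 <;> decide
  · simp only [List.mem_cons, List.not_mem_nil, or_false, not_or] at h1 h2 h3 h5
    obtain ⟨a1, a2, a3⟩ := h1; obtain ⟨b1, b2, b3⟩ := h2; obtain ⟨c1, c2⟩ := h3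
    obtain ⟨d1, d2, d3, d4, d5⟩ := h5
    simp [replacements, List.foldl_cons, *]

-- ===== VERDICT (by name: the statement is the Claim_ definition above) =====
theorem getCleanTitles_spec : Claim_equal_getCleanTitles := by
  intro title _
  show getCleanTitles title = getCleanTitles_alt title
  unfold getCleanTitles getCleanTitles_alt
  rw [PySem.List.len_eq, PySem.List.pyRange_zero_natCast, List.foldl_map]
  simp only [PySem.List.pyGetD_natCast, PySem.List.pySetD_natCast]
  calc (List.range title.length).foldl stepA title
      = (List.range' 0 title.length).foldl stepA (([] : List String) ++ title) := by
        rw [List.range_eq_range']; rfl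
    _ = ([] : List String) ++ title.map cascade := loopA_eq title []
    _ = title.map (fun t => replacements.foldl (fun t p => if t = p.1 then p.2 else t) t) := by
        simp only [List.nil_append]
        exact List.map_congr_left (fun t _ => cascade_eq_passes t)
    _ = replacements.foldl (fun acc p => acc.map (fun t => if t = p.1 then p.2 else t)) title :=
        (foldl_map_passes replacements title).symm
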